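-- pv_equiv track=rewrite | github.com/dglmoore/big-attrs | main.py | subspace
-- ===== SOURCE A (Python) =====
-- def subspace(subgraph, size=None, dynamic_values=None):
--     subgraph = list(subgraph)
--     subgraph.sort()
--
--     if dynamic_values is None:
--         state = [0] * size
--         yield state[:]
--         i = 0
--         while i != len(subgraph):
--             node = subgraph[i]
--             if state[node] + 1 < 2:
--                 state[node] += 1
--                 for j in range(i):
--                     state[subgraph[j]] = 0
--                 i = 0
--                 yield state[:]
--             else:
--                 i += 1
--     else:
--         parent_nodes, parent_attractors = dynamic_values
--         for attr in parent_attractors: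
--             for state in attr:
--                 yield state[:]
--                 i = 0
--                 while i != len(subgraph):
--                     node = subgraph[i]
--                     if state[node] + 1 < 2:
--                         state[node] += 1
--                         for j in range(i):
--                             state[subgraph[j]] = 0
--                         i = 0
--                         yield state[:]
--                     else:
--                         i += 1
-- ===== SOURCE B (Python) =====
-- def subspace(subgraph, size=None, dynamic_values=None):
--     sub = sorted(set(subgraph))
--     k = len(sub)
--     if dynamic_values is None:
--         for val in range(2 ** k):
--             state = [0] * size
--             for j in range(k):
--                 state[sub[j]] = (val >> j) & 1
--             yield state
--     else:
--         _, parent_attractors = dynamic_values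
--         for attr in parent_attractors:
--             for state in attr:
--                 start = sum(((state[sub[j]] & 1) << j) for j in range(k))
--                 for val in range(start, 2 ** k):
--                     out = list(state)
--                     for j in range(k):
--                         out[sub[j]] = (val >> j) & 1
--                     yield out
-- ===== Notes on version B (the rewrite author's own statement) =====
-- stated objective: alternative
-- what changed: Replaces A's in-place increment-and-reset carry walk over the sorted node list with direct integer enumeration over the sorted distinct nodes: each yielded state is built from a counter val by writing bit j of val into node sub[j], and in the dynamic branch the starting counter is computed in closed form from the parent state; B also copies parent states instead of mutating them in place (return values are identical).
-- outside the precondition, e.g. on subspace([0], None, ([], [[[2]]])): A returns [[2]], B returns [[0], [1]]; on subspace([0], None, ([], [[[-1]]])): A returns [[-1], [0], [1]], B returns [[1]]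
import Mathlib
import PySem

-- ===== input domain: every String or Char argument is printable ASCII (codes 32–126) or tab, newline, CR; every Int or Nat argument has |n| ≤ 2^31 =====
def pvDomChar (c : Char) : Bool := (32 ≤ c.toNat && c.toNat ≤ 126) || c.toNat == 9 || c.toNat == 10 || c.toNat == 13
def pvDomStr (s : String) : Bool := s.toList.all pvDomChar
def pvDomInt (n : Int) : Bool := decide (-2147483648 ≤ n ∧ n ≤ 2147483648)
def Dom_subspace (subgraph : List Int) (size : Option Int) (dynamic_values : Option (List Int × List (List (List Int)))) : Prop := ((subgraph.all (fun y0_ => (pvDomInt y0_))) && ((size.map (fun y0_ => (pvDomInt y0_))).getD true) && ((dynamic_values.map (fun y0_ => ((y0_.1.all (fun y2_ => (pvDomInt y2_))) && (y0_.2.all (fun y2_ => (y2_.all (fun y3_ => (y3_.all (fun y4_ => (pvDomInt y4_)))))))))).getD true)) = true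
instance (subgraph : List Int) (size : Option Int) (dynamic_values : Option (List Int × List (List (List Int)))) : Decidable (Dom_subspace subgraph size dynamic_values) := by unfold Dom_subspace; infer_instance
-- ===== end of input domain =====

-- B enumerates the binary assignments by an integer counter (bit j of val goes to sorted node j)
-- instead of A's in-place increment-and-reset carry walk; equivalence is about RETURN VALUES only
-- (Python A mutates the parent attractor state lists in place, B copies them).

-- ===== PORT A =====
-- the inner while-loop of A, with fuel (the loop terminates, fuel only makes the recursion structural)
def subWalkA (sub : List Int) : Nat → List Int → Nat → List (List Int)
  | 0, _, _ => []
  | fuel + 1, state, i =>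
    if i = sub.length then []
    else
      match PySem.List.pyGet? state (sub.getD i 0) with
      | none => []   -- Python: IndexError; excluded by Pre_
      | some sv =>
        if sv + 1 < 2 then
          let st1 := PySem.List.pySetD state (sub.getD i 0) (sv + 1)
          let st2 := (List.range i).foldl (fun st j => PySem.List.pySetD st (sub.getD j 0) 0) st1
          st2 :: subWalkA sub fuel st2 0
        else subWalkA sub fuel state (i + 1)

def subFuel (k : Nat) : Nat := (2 ^ k + 1) * (k + 1)

def subspace (subgraph : List Int) (size : Option Int) (dynamic_values : Option (List Int × List (List (List Int)))) : List (List Int) :=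
  let sub := PySem.List.sorted subgraph (fun x => x)
  match dynamic_values with
  | none =>
    match size with
    | none => []   -- Python: TypeError from [0]*None; excluded by Pre_
    | some n =>
      let state := List.replicate n.toNat (0 : Int)
      state :: subWalkA sub (subFuel sub.length) state 0
  | some dv =>
    dv.2.foldl (fun acc attr =>
      attr.foldl (fun acc state =>
        acc ++ (state :: subWalkA sub (subFuel sub.length) state 0)) acc) []

-- ===== PORT B =====
-- out[sub[j]] = (val >> j) & 1 for j in range(k)
def subDecodeB (sub : List Int) (state : List Int) (val : Int) : List Int :=
  (List.range sub.length).foldl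
    (fun out j => PySem.List.pySetD out (sub.getD j 0) (PySem.Int.band (val >>> j) 1)) state

-- start = sum((state[sub[j]] & 1) << j for j in range(k))
def subStartB (sub : List Int) (state : List Int) : Int :=
  ((List.range sub.length).map
    (fun j => (PySem.Int.band (PySem.List.pyGetD state (sub.getD j 0) 0) 1) <<< j)).sum

def subspace_alt (subgraph : List Int) (size : Option Int) (dynamic_values : Option (List Int × List (List (List Int)))) : List (List Int) :=
  let sub := PySem.List.sorted (PySem.Set.ofList subgraph) (fun x => x)
  let k := sub.length
  match dynamic_values with
  | none =>
    match size with
    | none => []   -- Python: TypeError from [0]*None; excluded by Pre_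
    | some n =>
      (PySem.List.pyRange 0 ((2 : Int) ^ k)).map
        (fun val => subDecodeB sub (List.replicate n.toNat (0 : Int)) val)
  | some dv =>
    dv.2.foldl (fun acc attr =>
      attr.foldl (fun acc state =>
        acc ++ (PySem.List.pyRange (subStartB sub state) ((2 : Int) ^ k)).map
          (fun val => subDecodeB sub state val)) acc) []

-- ===== PRECONDITION & SPEC =====
-- Python's effective index for an in-range (possibly negative) index into a list of length n
def effIdx (n : Nat) (i : Int) : Nat := if 0 ≤ i then i.toNat else n - (-i).toNat

def PreNodes (L : Nat) (sub : List Int) : Prop :=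
  (∀ x ∈ sub, PySem.Raise.InRange L x) ∧ ((PySem.List.dedup sub).map (effIdx L)).Nodup

-- Pre_ restricts to the function's natural domain: every subgraph node indexes into the state,
-- distinct node values hit distinct state positions (no negative-index aliasing), and
-- parent-attractor states are 0/1 at subgraph positions; outside it A either raises (missing
-- size, index out of range) or yields accidental sequences produced by its carry walk on
-- non-binary values / aliased positions.
def Pre_subspace (subgraph : List Int) (size : Option Int) (dynamic_values : Option (List Int × List (List (List Int)))) : Prop :=
  match dynamic_values, size with
  | none, none => False
  | none, some n => PreNodes n.toNat subgraph
  | some dv, _ =>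
    ∀ attr ∈ dv.2, ∀ st ∈ attr,
      PreNodes st.length subgraph ∧
      ∀ x ∈ subgraph, PySem.List.pyGetD st x 0 = 0 ∨ PySem.List.pyGetD st x 0 = 1

instance (subgraph : List Int) (size : Option Int) (dynamic_values : Option (List Int × List (List (List Int)))) : Decidable (Pre_subspace subgraph size dynamic_values) := by
  unfold Pre_subspace PreNodes PySem.Raise.InRange
  rcases dynamic_values with _ | dv <;> rcases size with _ | n <;> infer_instance

def pvWitness_subspace : List Int × Option Int × (Option (List Int × List (List (List Int)))) :=
  ([0, 1], some 2, none)

def Spec_subspace (subgraph : List Int) (size : Option Int) (dynamic_values : Option (List Int × List (List (List Int)))) (out : List (List Int)) : Prop := out = subspace_alt subgraph size dynamic_values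
instance (subgraph : List Int) (size : Option Int) (dynamic_values : Option (List Int × List (List (List Int)))) (out : List (List Int)) : Decidable (Spec_subspace subgraph size dynamic_values out) := by unfold Spec_subspace; infer_instance

-- ===== CLAIM (what is proved, stated in full; the proofs are below) =====
def Claim_equal_subspace : Prop := ∀ (subgraph : List Int) (size : Option Int) (dynamic_values : Option (List Int × List (List (List Int)))), Dom_subspace subgraph size dynamic_values → Pre_subspace subgraph size dynamic_values → Spec_subspace subgraph size dynamic_values (subspace subgraph size dynamic_values)

-- ===== LEMMAS AND PROOFS =====

-- decoding an integer counter into a state: position es[j] receives bit j of v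
def decN : List Nat → List Int → Nat → List Int
  | [], st, _ => st
  | e :: tl, st, v => decN tl (st.set e ((v % 2 : Nat) : Int)) (v / 2)

-- the counter value encoded by a state: bit j is the value at position es[j]
def valN : List Nat → List Int → Nat
  | [], _ => 0
  | e :: tl, st => (st.getD e 0).toNat + 2 * valN tl st


-- ---- basic pointwise list facts ----
lemma getD_set_ne (st : List Int) (e p : Nat) (x : Int) (h : p ≠ e) :
    (st.set e x).getD p 0 = st.getD p 0 := by
  simp [List.getD, List.getElem?_set_ne h.symm]

lemma getD_set_self (st : List Int) (e : Nat) (x : Int) (h : e < st.length) :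
    (st.set e x).getD e 0 = x := by
  simp [List.getD, h]

lemma set_getD_self (st : List Int) (e : Nat) (h : e < st.length) :
    st.set e (st.getD e 0) = st := by
  rw [List.getD_eq_getElem st 0 h]; exact List.set_getElem_self ..

lemma ext_getD (st st' : List Int) (hlen : st.length = st'.length)
    (h : ∀ p, st.getD p 0 = st'.getD p 0) : st = st' := by
  apply List.ext_getElem hlen
  intro i h1 h1'
  have := h i
  rwa [List.getD_eq_getElem st 0 h1, List.getD_eq_getElem st' 0 h1'] at this

-- ---- Python index semantics via effIdx ----
lemma effIdx_lt {L : Nat} {x : Int} (h : PySem.Raise.InRange L x) : effIdx L x < L := by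
  rcases h with ⟨h1, h2⟩
  unfold effIdx
  split <;> omega

lemma pyIdx?_eff {L : Nat} {x : Int} (h : PySem.Raise.InRange L x) :
    PySem.List.pyIdx? L x = some (effIdx L x) := by
  rcases h with ⟨h1, h2⟩
  simp only [PySem.List.pyIdx?, effIdx]
  split_ifs <;> first | rfl | omega

lemma pyGet?_eff {st : List Int} {x : Int} (h : PySem.Raise.InRange st.length x) :
    PySem.List.pyGet? st x = some (st.getD (effIdx st.length x) 0) := by
  have hl := effIdx_lt h
  simp [PySem.List.pyGet?, pyIdx?_eff h, List.getElem?_eq_getElem hl]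

lemma pySetD_eff {st : List Int} {x : Int} (v : Int) (h : PySem.Raise.InRange st.length x) :
    PySem.List.pySetD st x v = st.set (effIdx st.length x) v := by
  simp [PySem.List.pySetD, PySem.List.pySet?, pyIdx?_eff h]

lemma pyGetD_eff {st : List Int} {x : Int} (h : PySem.Raise.InRange st.length x) :
    PySem.List.pyGetD st x 0 = st.getD (effIdx st.length x) 0 := by
  simp [PySem.List.pyGetD, pyGet?_eff h]

-- ---- decN / valN characterisation ----
lemma toNat_le_one {a : Int} (h : a = 0 ∨ a = 1) : a.toNat ≤ 1 := by
  rcases h with h | h <;> simp [h]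

lemma intCast_toNat {a : Int} (h : a = 0 ∨ a = 1) : ((a.toNat : Nat) : Int) = a := by
  rcases h with h | h <;> simp [h]

lemma length_decN (es : List Nat) (st : List Int) (v : Nat) :
    (decN es st v).length = st.length := by
  induction es generalizing st v with
  | nil => rfl
  | cons e tl ih => simp [decN, ih]

lemma getD_decN_notMem (es : List Nat) (st : List Int) (v p : Nat) (h : p ∉ es) :
    (decN es st v).getD p 0 = st.getD p 0 := by
  induction es generalizing st v with
  | nil => rfl
  | cons e tl ih =>
    simp only [List.mem_cons, not_or] at h
    rw [decN, ih _ _ h.2, getD_set_ne _ _ _ _ h.1]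

lemma div_pow_succ_mod_two (a v k : Nat) (ha : a ≤ 1) :
    (a + 2 * v) / 2 ^ (k + 1) % 2 = v / 2 ^ k % 2 := by
  rw [pow_succ', ← Nat.div_div_eq_div_mul]
  congr 2
  omega

lemma getD_decN_at (es : List Nat) (st : List Int) (v j : Nat) (hnd : es.Nodup)
    (hin : ∀ e ∈ es, e < st.length) (hj : j < es.length) :
    (decN es st v).getD (es.getD j 0) 0 = ((v / 2 ^ j % 2 : Nat) : Int) := by
  induction es generalizing st v j with
  | nil => simp at hj
  | cons e tl ih =>
    rcases List.nodup_cons.mp hnd with ⟨he, hnd'⟩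
    cases j with
    | zero =>
      rw [decN]
      show (decN tl (st.set e _) (v / 2)).getD e 0 = _
      rw [getD_decN_notMem _ _ _ _ he,
        getD_set_self _ _ _ (hin e (List.mem_cons_self))]
      simp
    | succ j' =>
      rw [decN]
      show (decN tl (st.set e _) (v / 2)).getD (tl.getD j' 0) 0 = _
      rw [ih (st.set e _) (v / 2) j' hnd'
        (by intro x hx; rw [List.length_set]; exact hin x (List.mem_cons_of_mem _ hx))
        (by simpa using hj)]
      congr 1
      rw [pow_succ', ← Nat.div_div_eq_div_mul]

lemma valN_zero (es : List Nat) (st : List Int)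
    (h : ∀ e ∈ es, st.getD e 0 = 0) : valN es st = 0 := by
  induction es with
  | nil => rfl
  | cons e tl ih =>
    rw [valN, h e List.mem_cons_self, ih (fun x hx => h x (List.mem_cons_of_mem _ hx))]
    rfl

lemma valN_lt (es : List Nat) (st : List Int)
    (hb : ∀ e ∈ es, st.getD e 0 = 0 ∨ st.getD e 0 = 1) :
    valN es st < 2 ^ es.length := by
  induction es with
  | nil => simp [valN]
  | cons e tl ih =>
    have h1 : (st.getD e 0).toNat ≤ 1 := toNat_le_one (hb e List.mem_cons_self)
    have h2 := ih (fun x hx => hb x (List.mem_cons_of_mem _ hx))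
    rw [valN, List.length_cons, pow_succ']
    omega

lemma valN_bit (es : List Nat) (st : List Int)
    (hb : ∀ e ∈ es, st.getD e 0 = 0 ∨ st.getD e 0 = 1) :
    ∀ j < es.length, valN es st / 2 ^ j % 2 = (st.getD (es.getD j 0) 0).toNat := by
  induction es with
  | nil => simp
  | cons e tl ih =>
    intro j hj
    have h1 : (st.getD e 0).toNat ≤ 1 := toNat_le_one (hb e List.mem_cons_self)
    cases j with
    | zero =>
      rw [valN]
      show ((st.getD e 0).toNat + 2 * valN tl st) / 2 ^ 0 % 2 = (st.getD e 0).toNat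
      simp only [pow_zero, Nat.div_one]
      omega
    | succ j' =>
      rw [valN, div_pow_succ_mod_two _ _ _ h1]
      exact ih (fun x hx => hb x (List.mem_cons_of_mem _ hx)) j' (by simpa using hj)

lemma valN_ones (es : List Nat) (st : List Int)
    (h : ∀ j < es.length, st.getD (es.getD j 0) 0 = 1) :
    valN es st = 2 ^ es.length - 1 := by
  induction es with
  | nil => rfl
  | cons e tl ih =>
    have h0 : st.getD e 0 = 1 := h 0 (by simp)
    have h2 := ih (fun j hj => h (j + 1) (by simpa using hj))
    rw [valN, h0, List.length_cons, pow_succ']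
    have : 0 < 2 ^ tl.length := Nat.two_pow_pos _
    omega

lemma valN_zero_bit_lt (es : List Nat) (st : List Int)
    (hb : ∀ e ∈ es, st.getD e 0 = 0 ∨ st.getD e 0 = 1) :
    ∀ i < es.length, st.getD (es.getD i 0) 0 = 0 →
      valN es st + 2 ^ i < 2 ^ es.length := by
  induction es with
  | nil => simp
  | cons e tl ih =>
    intro i hi h0
    have h1 : (st.getD e 0).toNat ≤ 1 := toNat_le_one (hb e List.mem_cons_self)
    have hbt : ∀ e ∈ tl, st.getD e 0 = 0 ∨ st.getD e 0 = 1 :=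
      fun x hx => hb x (List.mem_cons_of_mem _ hx)
    have hlt := valN_lt tl st hbt
    cases i with
    | zero =>
      have : st.getD e 0 = 0 := by simpa using h0
      rw [valN, this, List.length_cons, pow_succ']
      simpa using by omega
    | succ i' =>
      have h3 := ih hbt i' (by simpa using hi) (by simpa using h0)
      rw [valN, List.length_cons, pow_succ', pow_succ']
      omega

lemma decN_id (es : List Nat) (st : List Int) (hnd : es.Nodup)
    (hin : ∀ e ∈ es, e < st.length)
    (hb : ∀ e ∈ es, st.getD e 0 = 0 ∨ st.getD e 0 = 1) :
    decN es st (valN es st) = st := by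
  induction es generalizing st with
  | nil => rfl
  | cons e tl ih =>
    rcases List.nodup_cons.mp hnd with ⟨he, hnd'⟩
    have h1 : (st.getD e 0).toNat ≤ 1 := toNat_le_one (hb e List.mem_cons_self)
    have hbit : (((st.getD e 0).toNat + 2 * valN tl st) % 2 : Nat) = (st.getD e 0).toNat := by
      omega
    have hdiv : (((st.getD e 0).toNat + 2 * valN tl st) / 2 : Nat) = valN tl st := by
      omega
    have hcast : (((st.getD e 0).toNat : Nat) : Int) = st.getD e 0 :=
      intCast_toNat (hb e List.mem_cons_self)
    rw [decN, valN, hbit, hdiv, hcast, set_getD_self _ _ (hin e List.mem_cons_self)]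
    exact ih st hnd' (fun x hx => hin x (List.mem_cons_of_mem _ hx))
      (fun x hx => hb x (List.mem_cons_of_mem _ hx))

lemma valN_decN (es : List Nat) (st : List Int) (v : Nat) (hnd : es.Nodup)
    (hin : ∀ e ∈ es, e < st.length) (hv : v < 2 ^ es.length) :
    valN es (decN es st v) = v := by
  induction es generalizing st v with
  | nil =>
    simp only [List.length_nil, pow_zero] at hv
    interval_cases v
    rfl
  | cons e tl ih =>
    rcases List.nodup_cons.mp hnd with ⟨he, hnd'⟩
    rw [decN, valN, getD_decN_notMem _ _ _ _ he,
      getD_set_self _ _ _ (hin e List.mem_cons_self),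
      ih (st.set e _) (v / 2) hnd'
        (by intro x hx; rw [List.length_set]; exact hin x (List.mem_cons_of_mem _ hx))
        (by rw [List.length_cons, pow_succ'] at hv; omega)]
    simp
    omega

lemma binary_decN (es : List Nat) (st : List Int) (v : Nat) (hnd : es.Nodup)
    (hin : ∀ e ∈ es, e < st.length) :
    ∀ e ∈ es, (decN es st v).getD e 0 = 0 ∨ (decN es st v).getD e 0 = 1 := by
  intro e he
  rcases List.mem_iff_getElem.mp he with ⟨j, hj, rfl⟩
  have : es[j] = es.getD j 0 := (List.getD_eq_getElem es 0 hj).symm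
  rw [this, getD_decN_at es st v j hnd hin hj]
  have := Nat.mod_two_eq_zero_or_one (v / 2 ^ j)
  rcases this with h | h <;> simp [h]


lemma nodup_getD_inj (es : List Nat) (hnd : es.Nodup) (i j : Nat)
    (hi : i < es.length) (hj : j < es.length) (he : es.getD i 0 = es.getD j 0) : i = j := by
  rw [List.getD_eq_getElem es 0 hi, List.getD_eq_getElem es 0 hj] at he
  exact (List.Nodup.getElem_inj_iff hnd).mp he

-- bits of valN + 1 after A's increment-and-reset step
lemma inc_bits (es : List Nat) (st : List Int)
    (hb : ∀ e ∈ es, st.getD e 0 = 0 ∨ st.getD e 0 = 1) :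
    ∀ i j : Nat, (∀ j' < i, st.getD (es.getD j' 0) 0 = 1) → i < es.length →
      st.getD (es.getD i 0) 0 = 0 → j < es.length →
      (valN es st + 1) / 2 ^ j % 2 =
        if j < i then 0 else if j = i then 1 else (st.getD (es.getD j 0) 0).toNat := by
  induction es generalizing st with
  | nil => intro i j _ hi; simp at hi
  | cons e tl ih =>
    intro i j hones hi h0 hj
    have h1 : (st.getD e 0).toNat ≤ 1 := toNat_le_one (hb e List.mem_cons_self)
    have hbt : ∀ x ∈ tl, st.getD x 0 = 0 ∨ st.getD x 0 = 1 :=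
      fun x hx => hb x (List.mem_cons_of_mem _ hx)
    cases i with
    | zero =>
      have hb0 : st.getD e 0 = 0 := by simpa using h0
      cases j with
      | zero =>
        rw [valN, hb0]
        show (0 + 2 * valN tl st + 1) / 2 ^ 0 % 2 = 1
        simp only [pow_zero, Nat.div_one]
        omega
      | succ j' =>
        rw [valN, hb0]
        show ((0 : Int).toNat + 2 * valN tl st + 1) / 2 ^ (j' + 1) % 2
            = if j' + 1 < 0 then 0 else if j' + 1 = 0 then 1
              else (st.getD (tl.getD j' 0) 0).toNat
        have : ((0 : Int).toNat + 2 * valN tl st + 1) = 1 + 2 * valN tl st := by omega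
        rw [this, div_pow_succ_mod_two 1 _ _ (by omega)]
        simpa using valN_bit tl st hbt j' (by simpa using hj)
    | succ i' =>
      have hb1 : st.getD e 0 = 1 := by simpa using hones 0 (by omega)
      cases j with
      | zero =>
        rw [valN, hb1]
        show ((1 : Int).toNat + 2 * valN tl st + 1) / 2 ^ 0 % 2
            = if 0 < i' + 1 then 0 else _
        simp only [pow_zero, Nat.div_one, if_pos (Nat.succ_pos i')]
        omega
      | succ j' =>
        rw [valN, hb1]
        have harr : ((1 : Int).toNat + 2 * valN tl st + 1) = 0 + 2 * (valN tl st + 1) := by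
          omega
        show ((1 : Int).toNat + 2 * valN tl st + 1) / 2 ^ (j' + 1) % 2 = _
        rw [harr, div_pow_succ_mod_two 0 _ _ (by omega)]
        have := ih st hbt i' j'
          (fun j'' hj'' => by simpa using hones (j'' + 1) (by omega))
          (by simpa using hi) (by simpa using h0) (by simpa using hj)
        rw [this]
        simp only [Nat.succ_lt_succ_iff, Nat.succ_inj]
        rfl

-- the reset loop 'for j in range(i): state[sub[j]] = 0', characterised pointwise
lemma resets_spec (i : Nat) (sub : List Int) (L : Nat) (st : List Int)
    (hlen : st.length = L) (hin : ∀ x ∈ sub, PySem.Raise.InRange L x)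
    (hi : i ≤ sub.length) :
    ((List.range i).foldl (fun s j => PySem.List.pySetD s (sub.getD j 0) 0) st).length = L ∧
    ∀ p, ((List.range i).foldl (fun s j => PySem.List.pySetD s (sub.getD j 0) 0) st).getD p 0
        = if ∃ j, j < i ∧ effIdx L (sub.getD j 0) = p then 0 else st.getD p 0 := by
  induction i with
  | zero =>
    refine ⟨by simpa using hlen, fun p => ?_⟩
    simp only [List.range_zero, List.foldl_nil]
    rw [if_neg]
    rintro ⟨j, hj, _⟩
    omega
  | succ i' ih =>
    have hih := ih (by omega)
    obtain ⟨hl, hp⟩ := hih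
    have hmem : sub.getD i' 0 ∈ sub := by
      rw [List.getD_eq_getElem sub 0 (by omega)]
      exact List.getElem_mem _
    have hinr : PySem.Raise.InRange
        ((List.range i').foldl (fun s j => PySem.List.pySetD s (sub.getD j 0) 0) st).length
        (sub.getD i' 0) := by rw [hl]; exact hin _ hmem
    have heff := effIdx_lt (hin _ hmem)
    rw [List.range_succ, List.foldl_append]
    simp only [List.foldl_cons, List.foldl_nil]
    rw [pySetD_eff 0 hinr]
    constructor
    · rw [List.length_set, hl]
    · intro p
      rw [hl] at hinr ⊢
      by_cases hpe : p = effIdx L (sub.getD i' 0)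
      · subst hpe
        rw [getD_set_self _ _ _ (by rw [hl]; exact heff)]
        rw [if_pos ⟨i', by omega, rfl⟩]
      · rw [getD_set_ne _ _ _ _ hpe, hp p]
        by_cases hex : ∃ j, j < i' ∧ effIdx L (sub.getD j 0) = p
        · rcases hex with ⟨j, hj, hje⟩
          rw [if_pos ⟨j, hj, hje⟩, if_pos ⟨j, (by omega : j < i' + 1), hje⟩]
        · rw [if_neg hex, if_neg]
          rintro ⟨j, hj, hje⟩
          rcases Nat.lt_succ_iff_lt_or_eq.mp hj with h | rfl
          · exact hex ⟨j, h, hje⟩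
          · exact hpe hje.symm


lemma getD_map_eff (sub : List Int) (L : Nat) (j : Nat) (hj : j < sub.length) :
    (sub.map (effIdx L)).getD j 0 = effIdx L (sub.getD j 0) := by
  rw [List.getD_eq_getElem _ 0 (by simpa using hj), List.getElem_map,
    List.getD_eq_getElem _ 0 hj]

lemma getD_mem_sub (sub : List Int) (j : Nat) (hj : j < sub.length) : sub.getD j 0 ∈ sub := by
  rw [List.getD_eq_getElem sub 0 hj]
  exact List.getElem_mem _

lemma getD_mem_es (es : List Nat) (j : Nat) (hj : j < es.length) : es.getD j 0 ∈ es := by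
  rw [List.getD_eq_getElem es 0 hj]
  exact List.getElem_mem _

lemma mem_es_in (sub : List Int) (L : Nat) (hin : ∀ x ∈ sub, PySem.Raise.InRange L x) :
    ∀ e ∈ sub.map (effIdx L), e < L := by
  intro e he
  rcases List.mem_map.mp he with ⟨x, hx, rfl⟩
  exact effIdx_lt (hin x hx)

-- dedup structure facts (PySem.Set.ofList keeps first occurrences in order)
lemma add_of_contains (s : List Int) (y : Int) (h : PySem.Set.contains s y = true) :
    PySem.Set.add s y = s := by
  have h' : y ∈ s := by simpa [PySem.Set.contains] using h
  simp [PySem.Set.add, PySem.Set.contains, h']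

lemma add_of_not_contains (s : List Int) (y : Int) (h : ¬ PySem.Set.contains s y = true) :
    PySem.Set.add s y = s ++ [y] := by
  have h' : y ∉ s := by simpa [PySem.Set.contains] using h
  simp [PySem.Set.add, PySem.Set.contains, h']

lemma foldl_add_suffix (ys : List Int) : ∀ s : List Int,
    ∃ t, ys.foldl PySem.Set.add s = s ++ t := by
  induction ys with
  | nil => intro s; exact ⟨[], by simp⟩
  | cons y tl ih =>
    intro s
    rw [List.foldl_cons]
    by_cases hy : PySem.Set.contains s y
    · rw [add_of_contains s y hy]
      exact ih s
    · rw [add_of_not_contains s y hy]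
      rcases ih (s ++ [y]) with ⟨t, ht⟩
      exact ⟨y :: t, by simpa using ht⟩

lemma foldl_add_sublist (ys : List Int) : ∀ s : List Int,
    List.Sublist (ys.foldl PySem.Set.add s) (s ++ ys) := by
  induction ys with
  | nil => intro s; simp
  | cons y tl ih =>
    intro s
    rw [List.foldl_cons]
    by_cases hy : PySem.Set.contains s y
    · rw [add_of_contains s y hy]
      exact (ih s).trans (by simp [List.Sublist.append_left, List.sublist_cons_self])
    · rw [add_of_not_contains s y hy]
      simpa using ih (s ++ [y])

lemma dedup_sublist (xs : List Int) : List.Sublist (PySem.List.dedup xs) xs := by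
  rw [PySem.List.dedup_eq_ofList, PySem.Set.ofList_eq_foldl]
  simpa using foldl_add_sublist xs []

lemma dedup_split (sub : List Int) (i : Nat) (hi : i < sub.length)
    (hnm : sub.getD i 0 ∉ sub.take i) :
    ∃ t, PySem.List.dedup sub
      = PySem.List.dedup (sub.take i) ++ sub.getD i 0 :: t := by
  have hsplit : sub = sub.take i ++ sub.getD i 0 :: sub.drop (i + 1) := by
    rw [List.getD_eq_getElem sub 0 hi, ← List.drop_eq_getElem_cons hi, List.take_append_drop]
  have h1 : PySem.List.dedup sub
      = PySem.List.dedup (sub.take i ++ sub.getD i 0 :: sub.drop (i + 1)) := by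
    conv_lhs => rw [hsplit]
  have hnm' : ¬ PySem.Set.contains (List.foldl PySem.Set.add [] (sub.take i)) (sub.getD i 0) = true := by
    intro hc
    apply hnm
    have hL : List.foldl PySem.Set.add [] (sub.take i) = PySem.List.dedup (sub.take i) := by
      rw [PySem.List.dedup_eq_ofList, PySem.Set.ofList_eq_foldl]
    rw [hL] at hc
    have : sub.getD i 0 ∈ PySem.List.dedup (sub.take i) := by
      simpa [PySem.Set.contains] using hc
    exact (PySem.List.mem_dedup _ _).mp this
  rcases foldl_add_suffix (sub.drop (i + 1))
    (List.foldl PySem.Set.add [] (sub.take i) ++ [sub.getD i 0]) with ⟨t, ht⟩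
  refine ⟨t, ?_⟩
  rw [h1, PySem.List.dedup_eq_ofList, PySem.List.dedup_eq_ofList,
    PySem.Set.ofList_eq_foldl, PySem.Set.ofList_eq_foldl, List.foldl_append, List.foldl_cons,
    add_of_not_contains _ _ hnm', ht]
  simp

lemma getD_append_length (A : List Nat) (x : Nat) (B : List Nat) (d : Nat) :
    (A ++ x :: B).getD A.length d = x := by
  rw [List.getD_eq_getElem?_getD, List.getElem?_append_right (le_refl A.length)]
  simp

lemma getD_append_left (A B : List Nat) (j : Nat) (d : Nat) (hj : j < A.length) :
    (A ++ B).getD j d = A.getD j d := by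
  rw [List.getD_eq_getElem?_getD, List.getElem?_append_left hj, ← List.getD_eq_getElem?_getD]

-- A's increment step (set node i to 1, reset nodes below i) produces decN (valN + 1),
-- with the counter read over the DEDUPED node list dd (i' = dd-index of node i)
lemma step_eq_decN (sub dd : List Int) (L : Nat) (st : List Int) (i i' : Nat)
    (hlen : st.length = L)
    (hin : ∀ x ∈ sub, PySem.Raise.InRange L x)
    (hisub : i < sub.length)
    (hnd : (dd.map (effIdx L)).Nodup)
    (hb : ∀ e ∈ dd.map (effIdx L), st.getD e 0 = 0 ∨ st.getD e 0 = 1)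
    (hinNd : ∀ e ∈ dd.map (effIdx L), e < st.length)
    (hones : ∀ j' < i', st.getD ((dd.map (effIdx L)).getD j' 0) 0 = 1)
    (hi' : i' < (dd.map (effIdx L)).length)
    (h0 : st.getD ((dd.map (effIdx L)).getD i' 0) 0 = 0)
    (heq : effIdx L (sub.getD i 0) = (dd.map (effIdx L)).getD i' 0)
    (hcond : ∀ p, (∃ j, j < i ∧ effIdx L (sub.getD j 0) = p)
        ↔ (∃ j', j' < i' ∧ (dd.map (effIdx L)).getD j' 0 = p)) :
    (List.range i).foldl (fun s j => PySem.List.pySetD s (sub.getD j 0) 0)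
        (PySem.List.pySetD st (sub.getD i 0) 1)
      = decN (dd.map (effIdx L)) st (valN (dd.map (effIdx L)) st + 1) := by
  have hinri : PySem.Raise.InRange st.length (sub.getD i 0) := by
    rw [hlen]; exact hin _ (getD_mem_sub sub i hisub)
  have hset : PySem.List.pySetD st (sub.getD i 0) 1
      = st.set (effIdx L (sub.getD i 0)) 1 := by
    rw [pySetD_eff 1 hinri, hlen]
  have hefflt : effIdx L (sub.getD i 0) < st.length := by
    rw [heq]; exact hinNd _ (getD_mem_es _ i' hi')
  have hlenset : (PySem.List.pySetD st (sub.getD i 0) 1).length = L := by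
    rw [hset, List.length_set, hlen]
  obtain ⟨hrl, hrp⟩ := resets_spec i sub L _ hlenset hin (le_of_lt hisub)
  apply ext_getD
  · rw [hrl, length_decN, hlen]
  · intro p
    rw [hrp p]
    by_cases hpes : p ∈ dd.map (effIdx L)
    · rcases List.mem_iff_getElem.mp hpes with ⟨j0, hj0, rfl⟩
      have hgd : (dd.map (effIdx L))[j0] = (dd.map (effIdx L)).getD j0 0 :=
        (List.getD_eq_getElem _ 0 hj0).symm
      rw [hgd]
      rw [getD_decN_at _ st _ j0 hnd hinNd hj0,
        inc_bits _ st hb i' j0 hones hi' h0 hj0]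
      rcases Nat.lt_trichotomy j0 i' with hlt | rfl | hgt
      · rw [if_pos ((hcond _).mpr ⟨j0, hlt, rfl⟩), if_pos hlt]
        rfl
      · rw [if_neg, if_neg (lt_irrefl j0), if_pos rfl]
        · rw [← heq, hset, getD_set_self _ _ _ hefflt]
          rfl
        · intro hex
          rcases (hcond _).mp hex with ⟨j', hj', hje⟩
          have := nodup_getD_inj _ hnd j' j0 (by omega) (by omega) hje
          omega
      · have hne : (dd.map (effIdx L)).getD j0 0 ≠ effIdx L (sub.getD i 0) := by
          rw [heq]
          intro hcontra
          have := nodup_getD_inj _ hnd j0 i' (by omega) (by omega) hcontra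
          omega
        have hnex : ¬ ∃ j, j < i ∧ effIdx L (sub.getD j 0) = (dd.map (effIdx L)).getD j0 0 := by
          intro hex
          rcases (hcond _).mp hex with ⟨j', hj', hje⟩
          have := nodup_getD_inj _ hnd j' j0 (by omega) (by omega) hje
          omega
        rw [if_neg hnex, if_neg (by omega : ¬ j0 < i'), if_neg (by omega : ¬ j0 = i'),
          hset, getD_set_ne _ _ _ _ hne]
        exact (intCast_toNat (by rw [← hgd]; exact hb _ hpes)).symm
    · have hne : p ≠ effIdx L (sub.getD i 0) := by
        rw [heq]
        intro hcontra
        exact hpes (hcontra ▸ getD_mem_es _ i' hi')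
      have hnex : ¬ ∃ j, j < i ∧ effIdx L (sub.getD j 0) = p := by
        intro hex
        rcases (hcond _).mp hex with ⟨j', hj', hje⟩
        exact hpes (hje ▸ getD_mem_es _ j' (by omega))
      rw [getD_decN_notMem _ _ _ _ hpes, if_neg hnex, hset, getD_set_ne _ _ _ _ hne]

-- A's while-loop on the sorted (possibly duplicated) node list enumerates exactly the
-- counters valN+1 .. 2^k-1 over the deduplicated node list
lemma walkA_spec (sub : List Int) (L : Nat)
    (hsort : sub.Pairwise (· ≤ ·))
    (hin : ∀ x ∈ sub, PySem.Raise.InRange L x)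
    (hnd : ((PySem.List.dedup sub).map (effIdx L)).Nodup) :
    ∀ (fuel : Nat) (st : List Int) (i : Nat),
    st.length = L →
    (∀ e ∈ (PySem.List.dedup sub).map (effIdx L), st.getD e 0 = 0 ∨ st.getD e 0 = 1) →
    (∀ j < i, st.getD (effIdx L (sub.getD j 0)) 0 = 1) →
    i ≤ sub.length →
    (2 ^ (PySem.List.dedup sub).length - valN ((PySem.List.dedup sub).map (effIdx L)) st)
        * (sub.length + 1) + (sub.length - i) + 1 ≤ fuel →
    subWalkA sub fuel st i
      = (PySem.List.pyRange ((valN ((PySem.List.dedup sub).map (effIdx L)) st : Int) + 1)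
          ((2 : Int) ^ (PySem.List.dedup sub).length)).map
          (fun v => decN ((PySem.List.dedup sub).map (effIdx L)) st v.toNat) := by
  intro fuel
  induction fuel with
  | zero => intro st i _ _ _ _ hfuel; omega
  | succ f ih =>
    intro st i hlen hb hones hile hfuel
    have hlenes : ((PySem.List.dedup sub).map (effIdx L)).length
        = (PySem.List.dedup sub).length := List.length_map ..
    have hinN : ∀ e ∈ (PySem.List.dedup sub).map (effIdx L), e < st.length := by
      rw [hlen]
      intro e he
      rcases List.mem_map.mp he with ⟨x, hx, rfl⟩
      exact effIdx_lt (hin x ((PySem.List.mem_dedup _ _).mp hx))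
    -- value of a dedup entry is a sub entry whose bit the scan invariant controls
    have hmemidx : ∀ x ∈ PySem.List.dedup sub, ∃ j, j < sub.length ∧ sub.getD j 0 = x := by
      intro x hx
      rcases List.mem_iff_getElem.mp ((PySem.List.mem_dedup _ _).mp hx) with ⟨j, hj, rfl⟩
      exact ⟨j, hj, List.getD_eq_getElem sub 0 hj⟩
    by_cases hik : i = sub.length
    · subst hik
      have hval : valN ((PySem.List.dedup sub).map (effIdx L)) st
          = 2 ^ (PySem.List.dedup sub).length - 1 := by
        rw [← hlenes]
        apply valN_ones
        intro j hj
        rw [hlenes] at hj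
        have hj' : j < (PySem.List.dedup sub).length := hj
        rcases hmemidx _ (getD_mem_sub _ j hj') with ⟨j2, hj2, hje⟩
        rw [getD_map_eff _ L j hj', ← hje]
        exact hones j2 hj2
      have hpos : (1 : Nat) ≤ 2 ^ (PySem.List.dedup sub).length := Nat.one_le_two_pow
      have hnil : PySem.List.pyRange ((valN ((PySem.List.dedup sub).map (effIdx L)) st : Int) + 1)
          ((2 : Int) ^ (PySem.List.dedup sub).length) = [] := by
        apply PySem.List.pyRange_one_eq_nil
        rw [hval]
        push_cast [hpos]
        omega
      rw [subWalkA, if_pos rfl, hnil, List.map_nil]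
    · have hi : i < sub.length := by omega
      have hinri : PySem.Raise.InRange st.length (sub.getD i 0) := by
        rw [hlen]; exact hin _ (getD_mem_sub sub i hi)
      have hget : PySem.List.pyGet? st (sub.getD i 0)
          = some (st.getD (effIdx L (sub.getD i 0)) 0) := by
        rw [pyGet?_eff hinri, hlen]
      have hmemdd : effIdx L (sub.getD i 0) ∈ (PySem.List.dedup sub).map (effIdx L) :=
        List.mem_map.mpr ⟨sub.getD i 0,
          (PySem.List.mem_dedup _ _).mpr (getD_mem_sub sub i hi), rfl⟩
      rcases hb _ hmemdd with h0 | h1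
      · -- bit of node i is 0: A increments here
        -- node i is not among the earlier nodes (its bit is 0, theirs are 1, sub is sorted)
        have hnm : sub.getD i 0 ∉ sub.take i := by
          intro hmem
          rcases List.mem_iff_getElem.mp hmem with ⟨j, hj, hje⟩
          rw [List.length_take] at hj
          have hj' : j < i := by omega
          have hji : j < sub.length := by omega
          rw [List.getElem_take] at hje
          have hpw := List.pairwise_iff_getElem.mp hsort
          have hi1 : i - 1 < sub.length := by omega
          have h1le : sub[i - 1] ≤ sub[i]'(by omega) := by
            rcases Nat.lt_or_ge j (i - 1) with hlt | hge
            · exact hpw (i-1) i hi1 (by omega) (by omega)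
            · have : j = i - 1 := by omega
              subst this
              rw [hje, List.getD_eq_getElem sub 0 hi]
          have h2le : sub[j] ≤ sub[i - 1] := by
            rcases Nat.lt_or_ge j (i - 1) with hlt | hge
            · exact hpw j (i-1) (by omega) hi1 hlt
            · have : j = i - 1 := by omega
              subst this
              exact le_refl _
          have heq1 : sub[i - 1] = sub[i]'(by omega) := by
            rw [List.getD_eq_getElem sub 0 hi] at hje
            omega
          have hbit := hones (i - 1) (by omega)
          rw [List.getD_eq_getElem sub 0 hi1, heq1, ← List.getD_eq_getElem sub 0] at hbit
          rw [hbit] at h0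
          norm_num at h0
        rcases dedup_split sub i hi hnm with ⟨t, hsplit⟩
        -- i' = position of node i in the deduplicated list
        have hddlen : (PySem.List.dedup sub).length
            = (PySem.List.dedup (sub.take i)).length + 1 + t.length := by
          rw [hsplit, List.length_append, List.length_cons]
          omega
        have hi' : (PySem.List.dedup (sub.take i)).length
            < ((PySem.List.dedup sub).map (effIdx L)).length := by
          rw [hlenes, hddlen]; omega
        have heqi' : effIdx L (sub.getD i 0)
            = ((PySem.List.dedup sub).map (effIdx L)).getD
                (PySem.List.dedup (sub.take i)).length 0 := by
          rw [hsplit, List.map_append, List.map_cons,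
            show (PySem.List.dedup (sub.take i)).length
              = ((PySem.List.dedup (sub.take i)).map (effIdx L)).length from (List.length_map ..).symm,
            getD_append_length]
        have hddtake : ∀ j' < (PySem.List.dedup (sub.take i)).length,
            ((PySem.List.dedup sub).map (effIdx L)).getD j' 0
              = effIdx L ((PySem.List.dedup (sub.take i)).getD j' 0) := by
          intro j' hj'
          rw [hsplit, List.map_append, getD_append_left _ _ _ _ (by simpa using hj'),
            getD_map_eff _ L j' hj']
        have htakeidx : ∀ x ∈ PySem.List.dedup (sub.take i),
            ∃ j, j < i ∧ sub.getD j 0 = x := by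
          intro x hx
          rcases List.mem_iff_getElem.mp ((PySem.List.mem_dedup _ _).mp hx) with ⟨j, hj, rfl⟩
          rw [List.length_take] at hj
          refine ⟨j, by omega, ?_⟩
          rw [List.getElem_take, List.getD_eq_getElem sub 0 (by omega)]
        have honesD : ∀ j' < (PySem.List.dedup (sub.take i)).length,
            st.getD (((PySem.List.dedup sub).map (effIdx L)).getD j' 0) 0 = 1 := by
          intro j' hj'
          rw [hddtake j' hj']
          rcases htakeidx _ (getD_mem_sub _ j' hj') with ⟨j, hj, hje⟩
          rw [← hje]
          exact hones j hj
        have h0D : st.getD (((PySem.List.dedup sub).map (effIdx L)).getD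
            (PySem.List.dedup (sub.take i)).length 0) 0 = 0 := by
          rw [← heqi']; exact h0
        have hcond : ∀ p, (∃ j, j < i ∧ effIdx L (sub.getD j 0) = p)
            ↔ (∃ j', j' < (PySem.List.dedup (sub.take i)).length
                ∧ ((PySem.List.dedup sub).map (effIdx L)).getD j' 0 = p) := by
          intro p
          constructor
          · rintro ⟨j, hj, rfl⟩
            have hmem : sub.getD j 0 ∈ PySem.List.dedup (sub.take i) := by
              apply (PySem.List.mem_dedup _ _).mpr
              apply List.mem_iff_getElem.mpr
              exact ⟨j, by rw [List.length_take]; omega,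
                by rw [List.getElem_take]; exact (List.getD_eq_getElem sub 0 (by omega)).symm⟩
            rcases List.mem_iff_getElem.mp hmem with ⟨j', hj', hje⟩
            refine ⟨j', hj', ?_⟩
            rw [hddtake j' hj', ← hje, List.getD_eq_getElem _ 0 hj']
          · rintro ⟨j', hj', rfl⟩
            rw [hddtake j' hj']
            rcases htakeidx _ (getD_mem_sub _ j' hj') with ⟨j, hj, hje⟩
            exact ⟨j, hj, by rw [hje]⟩
        have hstep := step_eq_decN sub (PySem.List.dedup sub) L st i
          (PySem.List.dedup (sub.take i)).length hlen hin hi hnd hb hinN honesD hi' h0D heqi' hcond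
        have hvlt := valN_lt ((PySem.List.dedup sub).map (effIdx L)) st hb
        have hv1 : valN ((PySem.List.dedup sub).map (effIdx L)) st + 1
            < 2 ^ (PySem.List.dedup sub).length := by
          have h' := valN_zero_bit_lt ((PySem.List.dedup sub).map (effIdx L)) st hb
            (PySem.List.dedup (sub.take i)).length hi' h0D
          have h2i : (1 : Nat) ≤ 2 ^ (PySem.List.dedup (sub.take i)).length := Nat.one_le_two_pow
          rw [hlenes] at h'
          omega
        have hst2len : (decN ((PySem.List.dedup sub).map (effIdx L)) st
            (valN ((PySem.List.dedup sub).map (effIdx L)) st + 1)).length = L := by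
          rw [length_decN, hlen]
        have hinN2 : ∀ e ∈ (PySem.List.dedup sub).map (effIdx L),
            e < (decN ((PySem.List.dedup sub).map (effIdx L)) st
              (valN ((PySem.List.dedup sub).map (effIdx L)) st + 1)).length := by
          rw [length_decN]; exact hinN
        have hb2 := binary_decN ((PySem.List.dedup sub).map (effIdx L)) st
          (valN ((PySem.List.dedup sub).map (effIdx L)) st + 1) hnd hinN
        have hval2 : valN ((PySem.List.dedup sub).map (effIdx L))
            (decN ((PySem.List.dedup sub).map (effIdx L)) st
              (valN ((PySem.List.dedup sub).map (effIdx L)) st + 1))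
            = valN ((PySem.List.dedup sub).map (effIdx L)) st + 1 :=
          valN_decN _ st _ hnd hinN (by rw [hlenes]; exact hv1)
        have hdc : ∀ v : Nat,
            decN ((PySem.List.dedup sub).map (effIdx L))
              (decN ((PySem.List.dedup sub).map (effIdx L)) st
                (valN ((PySem.List.dedup sub).map (effIdx L)) st + 1)) v
              = decN ((PySem.List.dedup sub).map (effIdx L)) st v := by
          intro v
          apply ext_getD
          · rw [length_decN, length_decN, length_decN]
          · intro p
            by_cases hp : p ∈ (PySem.List.dedup sub).map (effIdx L)
            · rcases List.mem_iff_getElem.mp hp with ⟨j0, hj0, rfl⟩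
              have hgd : ((PySem.List.dedup sub).map (effIdx L))[j0]
                  = ((PySem.List.dedup sub).map (effIdx L)).getD j0 0 :=
                (List.getD_eq_getElem _ 0 hj0).symm
              rw [hgd, getD_decN_at _ _ v j0 hnd hinN2 hj0, getD_decN_at _ st v j0 hnd hinN hj0]
            · rw [getD_decN_notMem _ _ _ _ hp, getD_decN_notMem _ _ _ _ hp,
                getD_decN_notMem _ _ _ _ hp]
        have hfuel2 : (2 ^ (PySem.List.dedup sub).length
              - (valN ((PySem.List.dedup sub).map (effIdx L)) st + 1)) * (sub.length + 1)
            + (sub.length - 0) + 1 ≤ f := by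
          have hexp : (2 ^ (PySem.List.dedup sub).length
                - valN ((PySem.List.dedup sub).map (effIdx L)) st) * (sub.length + 1)
              = (2 ^ (PySem.List.dedup sub).length
                  - (valN ((PySem.List.dedup sub).map (effIdx L)) st + 1)) * (sub.length + 1)
                + (sub.length + 1) := by
            have h2 : 2 ^ (PySem.List.dedup sub).length
                  - valN ((PySem.List.dedup sub).map (effIdx L)) st
                = (2 ^ (PySem.List.dedup sub).length
                    - (valN ((PySem.List.dedup sub).map (effIdx L)) st + 1)) + 1 := by
              rw [hlenes] at hvlt; omega
            rw [h2]; ring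
          rw [hexp] at hfuel
          omega
        have hih := ih (decN ((PySem.List.dedup sub).map (effIdx L)) st
            (valN ((PySem.List.dedup sub).map (effIdx L)) st + 1)) 0
          hst2len hb2 (by omega) (by omega) (by rw [hval2]; exact hfuel2)
        have hcons : PySem.List.pyRange
            ((valN ((PySem.List.dedup sub).map (effIdx L)) st : Int) + 1)
            ((2 : Int) ^ (PySem.List.dedup sub).length)
            = ((valN ((PySem.List.dedup sub).map (effIdx L)) st : Int) + 1)
              :: PySem.List.pyRange ((valN ((PySem.List.dedup sub).map (effIdx L)) st : Int) + 1 + 1)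
                ((2 : Int) ^ (PySem.List.dedup sub).length) := by
          apply PySem.List.pyRange_one_cons
          exact_mod_cast hv1
        rw [subWalkA, if_neg hik, hget, h0]
        norm_num
        simp only [← PySem.List.dedup_eq_ofList]
        simp only [List.getD_eq_getElem?_getD] at hstep
        rw [hstep, hih, hval2, hcons, List.map_cons,
          show ((valN ((PySem.List.dedup sub).map (effIdx L)) st : Int) + 1).toNat
              = valN ((PySem.List.dedup sub).map (effIdx L)) st + 1 from by omega,
          show ((valN ((PySem.List.dedup sub).map (effIdx L)) st + 1 : Nat) : Int) + 1
              = (valN ((PySem.List.dedup sub).map (effIdx L)) st : Int) + 1 + 1 from by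
            push_cast; ring]
        exact congrArg _ (List.map_congr_left (fun v hv => hdc v.toNat))
      · -- bit of node i is 1: skip to i + 1
        have hih := ih st (i + 1) hlen hb
          (by
            intro j hj
            rcases Nat.lt_succ_iff_lt_or_eq.mp hj with h | rfl
            · exact hones j h
            · exact h1)
          (by omega) (by omega)
        rw [subWalkA, if_neg hik, hget, h1]
        norm_num
        simp only [← PySem.List.dedup_eq_ofList]
        exact hih


lemma band_natCast_one (m : Nat) : PySem.Int.band ((m : Nat) : Int) 1 = ((m % 2 : Nat) : Int) := by
  rw [PySem.Int.band_one, PySem.Int.mod_eq_emod_of_pos (by norm_num)]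
  omega

-- B's per-counter decoder equals decN
lemma subDecodeB_eq (sub : List Int) (L : Nat) :
    ∀ (st : List Int) (m : Nat), st.length = L → (∀ x ∈ sub, PySem.Raise.InRange L x) →
      subDecodeB sub st ((m : Nat) : Int) = decN (sub.map (effIdx L)) st m := by
  induction sub with
  | nil => intro st m _ _; rfl
  | cons e tl ih =>
    intro st m hlen hin
    have hinre : PySem.Raise.InRange st.length e := by
      rw [hlen]; exact hin e List.mem_cons_self
    unfold subDecodeB
    rw [show (e :: tl).length = tl.length + 1 from rfl, List.range_succ_eq_map,
      List.foldl_cons, List.foldl_map]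
    rw [show (e :: tl).getD 0 0 = e from rfl, Int.shiftRight_zero, band_natCast_one,
      pySetD_eff _ hinre]
    rw [PySem.List.foldl_congr_mem (List.range tl.length) _
      (fun out j => PySem.List.pySetD out (tl.getD j 0)
        (PySem.Int.band (((m / 2 : Nat) : Int) >>> j) 1)) _
      (by
        intro acc j _
        rw [List.getD_cons_succ]
        have h1 : ((m : Nat) : Int) >>> (j + 1) = (((m / 2 : Nat) : Int)) >>> j := by
          have a1 : ((m : Nat) : Int) >>> (j + 1) = ((m >>> (j + 1) : Nat) : Int) := by simp
          have a2 : (((m / 2 : Nat)) : Int) >>> j = (((m / 2) >>> j : Nat) : Int) := by simp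
          rw [a1, a2]
          congr 1
          simp only [Nat.shiftRight_eq_div_pow]
          rw [pow_succ']
          exact (Nat.div_div_eq_div_mul m 2 (2 ^ j)).symm
        rw [h1])]
    rw [show decN ((e :: tl).map (effIdx L)) st m
        = decN (tl.map (effIdx L)) (st.set (effIdx L e) ((m % 2 : Nat) : Int)) (m / 2) from rfl]
    rw [← ih (st.set (effIdx L e) ((m % 2 : Nat) : Int)) (m / 2)
      (by rw [List.length_set, hlen]) (fun x hx => hin x (List.mem_cons_of_mem _ hx))]
    rw [hlen]
    rfl

-- B's closed-form start counter equals valN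
lemma subStartB_eq (sub : List Int) (L : Nat) :
    ∀ (st : List Int), st.length = L → (∀ x ∈ sub, PySem.Raise.InRange L x) →
      (∀ x ∈ sub, PySem.List.pyGetD st x 0 = 0 ∨ PySem.List.pyGetD st x 0 = 1) →
      subStartB sub st = ((valN (sub.map (effIdx L)) st : Nat) : Int) := by
  induction sub with
  | nil => intro st _ _ _; rfl
  | cons e tl ih =>
    intro st hlen hin hb
    have hinre : PySem.Raise.InRange st.length e := by
      rw [hlen]; exact hin e List.mem_cons_self
    have hbe := hb e List.mem_cons_self
    unfold subStartB
    rw [show (e :: tl).length = tl.length + 1 from rfl, List.range_succ_eq_map,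
      List.map_cons, List.sum_cons, List.map_map]
    rw [show (e :: tl).getD 0 0 = e from rfl, Int.shiftLeft_zero]
    have hband : PySem.Int.band (PySem.List.pyGetD st e 0) 1 = PySem.List.pyGetD st e 0 := by
      rcases hbe with h | h <;> rw [h] <;> decide
    rw [hband]
    have hterm : ∀ j ∈ List.range tl.length,
        ((fun j => PySem.Int.band (PySem.List.pyGetD st ((e :: tl).getD j 0) 0) 1 <<< j) ∘ Nat.succ) j
          = 2 * (PySem.Int.band (PySem.List.pyGetD st (tl.getD j 0) 0) 1 <<< j) := by
      intro j _
      simp only [Function.comp_apply, List.getD_cons_succ]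
      rw [Int.shiftLeft_eq, Int.shiftLeft_eq, pow_succ']
      ring
    rw [List.map_congr_left hterm, PySem.List.sum_map_const_mul_int]
    have hihtl := ih st hlen (fun x hx => hin x (List.mem_cons_of_mem _ hx))
      (fun x hx => hb x (List.mem_cons_of_mem _ hx))
    unfold subStartB at hihtl
    rw [hihtl]
    rw [show valN ((e :: tl).map (effIdx L)) st
        = (st.getD (effIdx L e) 0).toNat + 2 * valN (tl.map (effIdx L)) st from rfl]
    have hpg : PySem.List.pyGetD st e 0 = st.getD (effIdx L e) 0 := by
      rw [pyGetD_eff hinre, hlen]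
    have hbe' : st.getD (effIdx L e) 0 = 0 ∨ st.getD (effIdx L e) 0 = 1 := by
      rw [← hpg]; exact hbe
    rw [hpg]
    push_cast [intCast_toNat hbe']
    ring


-- B's node list sorted(set(xs)) is the dedup of A's sorted node list
lemma sortedSet_eq_dedup_sorted (xs : List Int) :
    PySem.List.sorted (PySem.Set.ofList xs) (fun x => x)
      = PySem.List.dedup (PySem.List.sorted xs (fun x => x)) := by
  apply PySem.List.sorted_eq_of_perm_of_pairwise_lt
  · apply (List.perm_ext_iff_of_nodup (PySem.List.nodup_dedup _) ?_).mpr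
    · intro a
      rw [PySem.List.mem_dedup, PySem.List.mem_sorted, ← PySem.List.dedup_eq_ofList,
        PySem.List.mem_dedup]
    · rw [← PySem.List.dedup_eq_ofList]
      exact PySem.List.nodup_dedup _
  · have hpw : (PySem.List.dedup (PySem.List.sorted xs (fun x => x))).Pairwise (· ≤ ·) :=
      List.Pairwise.sublist (dedup_sublist _) (PySem.List.sorted_pairwise xs (fun x => x))
    have hnd : (PySem.List.dedup (PySem.List.sorted xs (fun x => x))).Nodup :=
      PySem.List.nodup_dedup _
    exact (hpw.and hnd).imp (fun h => lt_of_le_of_ne h.1 h.2)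

lemma dedup_sorted_perm (xs : List Int) :
    (PySem.List.dedup (PySem.List.sorted xs (fun x => x))).Perm (PySem.List.dedup xs) := by
  apply (List.perm_ext_iff_of_nodup (PySem.List.nodup_dedup _) (PySem.List.nodup_dedup _)).mpr
  intro a
  rw [PySem.List.mem_dedup, PySem.List.mem_dedup, PySem.List.mem_sorted]

-- one parent state: A's yield-then-walk equals B's counter range over the deduped nodes
lemma perState (sub : List Int) (st : List Int)
    (hsort : sub.Pairwise (· ≤ ·))
    (hin : ∀ x ∈ sub, PySem.Raise.InRange st.length x)
    (hnd : ((PySem.List.dedup sub).map (effIdx st.length)).Nodup)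
    (hb : ∀ x ∈ sub, PySem.List.pyGetD st x 0 = 0 ∨ PySem.List.pyGetD st x 0 = 1) :
    st :: subWalkA sub (subFuel sub.length) st 0
      = (PySem.List.pyRange (subStartB (PySem.List.dedup sub) st)
          ((2 : Int) ^ (PySem.List.dedup sub).length)).map
          (fun val => subDecodeB (PySem.List.dedup sub) st val) := by
  have hin' : ∀ x ∈ PySem.List.dedup sub, PySem.Raise.InRange st.length x :=
    fun x hx => hin x ((PySem.List.mem_dedup _ _).mp hx)
  have hb' : ∀ x ∈ PySem.List.dedup sub,
      PySem.List.pyGetD st x 0 = 0 ∨ PySem.List.pyGetD st x 0 = 1 :=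
    fun x hx => hb x ((PySem.List.mem_dedup _ _).mp hx)
  have hbN : ∀ e ∈ (PySem.List.dedup sub).map (effIdx st.length),
      st.getD e 0 = 0 ∨ st.getD e 0 = 1 := by
    intro e he
    rcases List.mem_map.mp he with ⟨x, hx, rfl⟩
    have h' := hb' x hx
    rwa [pyGetD_eff (hin' x hx)] at h'
  have hinN : ∀ e ∈ (PySem.List.dedup sub).map (effIdx st.length), e < st.length :=
    mem_es_in _ st.length hin'
  have hvlt := valN_lt ((PySem.List.dedup sub).map (effIdx st.length)) st hbN
  rw [List.length_map] at hvlt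
  have hddle : (PySem.List.dedup sub).length ≤ sub.length :=
    (dedup_sublist sub).length_le
  have hfuel : (2 ^ (PySem.List.dedup sub).length
        - valN ((PySem.List.dedup sub).map (effIdx st.length)) st) * (sub.length + 1)
      + (sub.length - 0) + 1 ≤ subFuel sub.length := by
    unfold subFuel
    have hple : 2 ^ (PySem.List.dedup sub).length ≤ 2 ^ sub.length :=
      Nat.pow_le_pow_right (by norm_num) hddle
    have h1 : (2 ^ (PySem.List.dedup sub).length
          - valN ((PySem.List.dedup sub).map (effIdx st.length)) st) * (sub.length + 1)
        ≤ 2 ^ sub.length * (sub.length + 1) :=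
      Nat.mul_le_mul_right _ (le_trans (Nat.sub_le _ _) hple)
    have h2 : (2 ^ sub.length + 1) * (sub.length + 1)
        = 2 ^ sub.length * (sub.length + 1) + (sub.length + 1) := by ring
    omega
  have hwalk := walkA_spec sub st.length hsort hin hnd (subFuel sub.length) st 0 rfl hbN
    (by omega) (by omega) hfuel
  have hstart := subStartB_eq (PySem.List.dedup sub) st.length st rfl hin' hb'
  rw [hwalk, hstart]
  have hcons : PySem.List.pyRange ((valN ((PySem.List.dedup sub).map (effIdx st.length)) st : Int))
      ((2 : Int) ^ (PySem.List.dedup sub).length)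
      = ((valN ((PySem.List.dedup sub).map (effIdx st.length)) st : Int))
        :: PySem.List.pyRange ((valN ((PySem.List.dedup sub).map (effIdx st.length)) st : Int) + 1)
          ((2 : Int) ^ (PySem.List.dedup sub).length) :=
    PySem.List.pyRange_one_cons (by exact_mod_cast hvlt)
  rw [hcons, List.map_cons]
  congr 1
  · rw [subDecodeB_eq (PySem.List.dedup sub) st.length st _ rfl hin',
      decN_id _ _ hnd hinN hbN]
  · apply List.map_congr_left
    intro v hv
    have hv0 : ((valN ((PySem.List.dedup sub).map (effIdx st.length)) st : Int)) + 1 ≤ v :=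
      (PySem.List.mem_pyRange_one.mp hv).1
    have h' := subDecodeB_eq (PySem.List.dedup sub) st.length st v.toNat rfl hin'
    rw [show ((v.toNat : Nat) : Int) = v from by omega] at h'
    rw [h']

-- ===== VERDICT (by name: the statement is the Claim_ definition above) =====
theorem subspace_spec : Claim_equal_subspace := by
  intro subgraph size dynamic_values _ hpre
  unfold Spec_subspace subspace subspace_alt
  rw [sortedSet_eq_dedup_sorted]
  rcases dynamic_values with _ | dv
  · rcases size with _ | n
    · exact hpre.elim
    · obtain ⟨hinr, hnd⟩ : PreNodes n.toNat subgraph := hpre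
      have hperm := PySem.List.sorted_perm subgraph (fun x => x) false
      have hlrep : (List.replicate n.toNat (0 : Int)).length = n.toNat := List.length_replicate
      have hsort : (PySem.List.sorted subgraph (fun x => x)).Pairwise (· ≤ ·) :=
        PySem.List.sorted_pairwise subgraph (fun x => x)
      have hin' : ∀ x ∈ PySem.List.sorted subgraph (fun x => x),
          PySem.Raise.InRange (List.replicate n.toNat (0 : Int)).length x := by
        intro x hx
        rw [hlrep]
        exact hinr x (hperm.mem_iff.mp hx)
      have hnd' : ((PySem.List.dedup (PySem.List.sorted subgraph (fun x => x))).map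
          (effIdx (List.replicate n.toNat (0 : Int)).length)).Nodup := by
        rw [hlrep]
        exact (((dedup_sorted_perm subgraph).map (effIdx n.toNat)).nodup_iff).mpr hnd
      have hb' : ∀ x ∈ PySem.List.sorted subgraph (fun x => x),
          PySem.List.pyGetD (List.replicate n.toNat (0 : Int)) x 0 = 0 ∨
          PySem.List.pyGetD (List.replicate n.toNat (0 : Int)) x 0 = 1 := by
        intro x hx
        left
        rw [pyGetD_eff (hin' x hx)]
        have hl := effIdx_lt (hin' x hx)
        exact List.getD_replicate 0 (by omega)
      have hzero : subStartB (PySem.List.dedup (PySem.List.sorted subgraph (fun x => x)))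
          (List.replicate n.toNat (0 : Int)) = 0 := by
        rw [subStartB_eq _ (List.replicate n.toNat (0 : Int)).length _ rfl
          (fun x hx => hin' x ((PySem.List.mem_dedup _ _).mp hx))
          (fun x hx => hb' x ((PySem.List.mem_dedup _ _).mp hx))]
        rw [valN_zero]
        · rfl
        · intro e he
          rcases List.mem_map.mp he with ⟨x, hx, rfl⟩
          have hx' := (PySem.List.mem_dedup _ _).mp hx
          have hl := effIdx_lt (hin' x hx')
          exact List.getD_replicate 0 (by omega)
      show List.replicate n.toNat (0 : Int) :: subWalkA _ _ _ _ = _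
      rw [perState _ _ hsort hin' hnd' hb', hzero]
  · -- dynamic branch
    simp only [PySem.List.foldl_append_eq_flatMap, List.nil_append]
    apply List.flatMap_congr
    intro attr hattr
    apply List.flatMap_congr
    intro st hst
    obtain ⟨⟨hinr, hnd⟩, hb⟩ := hpre attr hattr st hst
    have hperm := PySem.List.sorted_perm subgraph (fun x => x) false
    exact perState _ st (PySem.List.sorted_pairwise subgraph (fun x => x))
      (fun x hx => hinr x (hperm.mem_iff.mp hx))
      ((((dedup_sorted_perm subgraph).map (effIdx st.length)).nodup_iff).mpr hnd)
      (fun x hx => hb x (hperm.mem_iff.mp hx))
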